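-- pv_equiv track=rewrite | github.com/ArthurBabkin/EGE | 19-21 номер ЕГЭ/2 кучи теория/30 номер word поляков.py | f
-- ===== SOURCE A (Python) =====
-- win = 62
--
-- def f(a, b, c, m):
--     if a + b >= win:
--         return c % 2 == m % 2
--     if c == m:
--         return False
--     moves = [f(a + 3, b, c + 1, m),
--              f(a, b + 3, c + 1, m),
--              f(a * 2, b, c + 1, m),
--              f(a, b * 2, c + 1, m)]
--     return any(moves) if (c + 1) % 2 == m % 2 else all(moves)
-- ===== SOURCE B (Python) =====
-- win = 62
--
-- def f(a, b, c, m):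
--     if a + b >= win:
--         return c % 2 == m % 2
--     if c == m:
--         return False
--     # forward sweep: deduplicated non-terminal states reachable at each round
--     levels = []
--     frontier = [(a, b)]
--     lv = c
--     while frontier and lv < m:
--         levels.append(frontier)
--         nxt = []
--         seen = set()
--         for x, y in frontier:
--             for u, v in ((x + 3, y), (x, y + 3), (x * 2, y), (x, y * 2)):
--                 if u + v < win and (u, v) not in seen:
--                     seen.add((u, v))
--                     nxt.append((u, v))
--         frontier = nxt
--         lv += 1
--     # backward sweep: value every stored state, one round at a time
--     vals = {}
--     for i in range(len(levels) - 1, -1, -1):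
--         ci = c + i
--         mover = (ci + 1) % 2 == m % 2
--         cur = {}
--         for x, y in levels[i]:
--             ks = []
--             for u, v in ((x + 3, y), (x, y + 3), (x * 2, y), (x, y * 2)):
--                 if u + v >= win:
--                     ks.append((ci + 1) % 2 == m % 2)
--                 elif ci + 1 == m:
--                     ks.append(False)
--                 else:
--                     ks.append(vals[(u, v)])
--             cur[(x, y)] = any(ks) if mover else all(ks)
--         vals = cur
--     return vals[(a, b)]
-- ===== Notes on version B (the rewrite author's own statement) =====
-- stated objective: faster
-- what changed: replaces A's 4^depth recursive game-tree search by an iterative forward BFS over deduplicated (a,b) states per round followed by a backward dynamic-programming sweep that values each stored state once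
-- outside the precondition, e.g. on f(30, 30, 5, 3): A returns False, B raises KeyError; on f(0, 61, 0, 950): A returns False, B returns False
import Mathlib
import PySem

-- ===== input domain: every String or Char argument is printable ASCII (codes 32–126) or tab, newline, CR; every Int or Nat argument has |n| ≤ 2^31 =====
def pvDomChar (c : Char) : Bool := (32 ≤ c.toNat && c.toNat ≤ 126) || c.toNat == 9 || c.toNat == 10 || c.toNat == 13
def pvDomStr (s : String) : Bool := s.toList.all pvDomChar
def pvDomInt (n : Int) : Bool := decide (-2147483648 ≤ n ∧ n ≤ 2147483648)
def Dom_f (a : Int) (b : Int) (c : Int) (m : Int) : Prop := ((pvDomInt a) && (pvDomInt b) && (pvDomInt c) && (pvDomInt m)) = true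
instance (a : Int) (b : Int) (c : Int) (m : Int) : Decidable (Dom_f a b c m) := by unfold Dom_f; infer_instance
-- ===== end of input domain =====

-- B replaces A's per-path recursive game-tree search by a forward BFS over deduplicated states
-- plus a backward dynamic-programming sweep that values each stored state once (objective: faster
-- by algorithm change; a timing run could not measure it on its generated sizes).

-- ===== PORT A =====
-- literal port of A's recursion; the fuel (m - c).toNat only makes the recursion structural:
-- it is exactly the depth A's recursion can reach before the `c == m` stopper fires, so it is
-- never exhausted on inputs satisfying Pre_f.
def fA_aux : Nat → Int → Int → Int → Int → Bool
  | 0, a, b, c, m =>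
    if 62 ≤ a + b then decide (PySem.Int.mod c 2 = PySem.Int.mod m 2)
    else if c = m then false
    else false
  | fuel + 1, a, b, c, m =>
    if 62 ≤ a + b then decide (PySem.Int.mod c 2 = PySem.Int.mod m 2)
    else if c = m then false
    else
      let moves := [fA_aux fuel (a + 3) b (c + 1) m,
                    fA_aux fuel a (b + 3) (c + 1) m,
                    fA_aux fuel (a * 2) b (c + 1) m,
                    fA_aux fuel a (b * 2) (c + 1) m]
      if PySem.Int.mod (c + 1) 2 = PySem.Int.mod m 2 then moves.any id else moves.all id

def f (a : Int) (b : Int) (c : Int) (m : Int) : Bool := fA_aux ((m - c).toNat) a b c m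

-- ===== PORT B =====
def kidsB (x : Int) (y : Int) : List (Int × Int) := [(x + 3, y), (x, y + 3), (x * 2, y), (x, y * 2)]

-- forward sweep: while frontier and lv < m, store the frontier and move to the deduplicated
-- non-terminal successors (fuel (m - c).toNat = the maximal number of loop iterations)
def fwdB : Nat → List (List (Int × Int)) → List (Int × Int) → Int → Int → List (List (Int × Int))
  | 0, levels, _, _, _ => levels
  | fuel + 1, levels, frontier, lv, m =>
    if frontier ≠ [] ∧ lv < m then
      fwdB fuel (levels ++ [frontier])
        (PySem.Set.ofList ((frontier.flatMap (fun p => kidsB p.1 p.2)).filter (fun q => q.1 + q.2 < 62)))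
        (lv + 1) m
    else levels

-- value of one stored state at round ci, given the value table of round ci+1
def lvlvalB (vals : PySem.Dict (Int × Int) Bool) (ci : Int) (m : Int) (x : Int) (y : Int) : Bool :=
  let ks := (kidsB x y).map (fun q =>
    if 62 ≤ q.1 + q.2 then decide (PySem.Int.mod (ci + 1) 2 = PySem.Int.mod m 2)
    else if ci + 1 = m then false
    else vals.getD q false)   -- Python vals[(u,v)]: under Pre_f the key is always present
  if PySem.Int.mod (ci + 1) 2 = PySem.Int.mod m 2 then ks.any id else ks.all id

-- backward sweep: the Python for-loop runs from the last stored level back to the first,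
-- carrying the previous round's table; recursing on the list head does the same.
def bwdB : List (List (Int × Int)) → Int → Int → PySem.Dict (Int × Int) Bool
  | [], _, _ => PySem.Dict.empty
  | L :: rest, ci, m =>
    let vals := bwdB rest (ci + 1) m
    L.foldl (fun cur p => cur.insert p (lvlvalB vals ci m p.1 p.2)) PySem.Dict.empty

def f_alt (a : Int) (b : Int) (c : Int) (m : Int) : Bool :=
  if 62 ≤ a + b then decide (PySem.Int.mod c 2 = PySem.Int.mod m 2)
  else if c = m then false
  else (bwdB (fwdB ((m - c).toNat) [] [(a, b)] c m) c m).getD (a, b) false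

-- ===== PRECONDITION & SPEC =====
-- Pre_f excludes (i) inputs with a + b < 62 and c > m, where A's recursion has no `c == m`
-- stopper (A diverges on most of them and B raises KeyError there), and (ii) inputs with a
-- non-positive heap and recursion depth m - c > 800, where doubling that heap keeps the game
-- alive for the full depth and A's outcome depends on the interpreter stack limit
-- (RecursionError beyond it); with both heaps ≥ 1 every move grows a + b, the depth is
-- bounded by 60 and A never overflows the stack.
def Pre_f (a : Int) (b : Int) (c : Int) (m : Int) : Prop :=
  62 ≤ a + b ∨ (c ≤ m ∧ (m - c ≤ 800 ∨ (1 ≤ a ∧ 1 ≤ b)))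
instance (a : Int) (b : Int) (c : Int) (m : Int) : Decidable (Pre_f a b c m) := by unfold Pre_f; infer_instance
def pvWitness_f : Int × Int × Int × Int := (0, 0, 0, 4)

def Spec_f (a : Int) (b : Int) (c : Int) (m : Int) (out : Bool) : Prop := out = f_alt a b c m
instance (a : Int) (b : Int) (c : Int) (m : Int) (out : Bool) : Decidable (Spec_f a b c m out) := by unfold Spec_f; infer_instance

-- ===== CLAIM (what is proved, stated in full; the proofs are below) =====
def Claim_equal_f : Prop := ∀ (a : Int) (b : Int) (c : Int) (m : Int), Dom_f a b c m → Pre_f a b c m → Spec_f a b c m (f a b c m)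

-- ===== LEMMAS AND PROOFS =====

-- base-case unfoldings of A's port, independent of the fuel
theorem fA_aux_win (fuel : Nat) (a b c m : Int) (h : 62 ≤ a + b) :
    fA_aux fuel a b c m = decide (PySem.Int.mod c 2 = PySem.Int.mod m 2) := by
  cases fuel <;> simp [fA_aux, h]

theorem fA_aux_stop (fuel : Nat) (a b c m : Int) (h : ¬ 62 ≤ a + b) (hc : c = m) :
    fA_aux fuel a b c m = false := by
  cases fuel <;> simp [fA_aux, h, hc]

-- the forward loop's accumulator prepends
theorem fwdB_acc : ∀ (fuel : Nat) (levels : List (List (Int × Int))) (F : List (Int × Int)) (lv m : Int),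
    fwdB fuel levels F lv m = levels ++ fwdB fuel [] F lv m := by
  intro fuel
  induction fuel with
  | zero => intro levels F lv m; simp [fwdB]
  | succ n ih =>
    intro levels F lv m
    by_cases h : F ≠ [] ∧ lv < m
    · simp only [fwdB, if_pos h]
      rw [ih (levels ++ [F]), ih ([] ++ [F])]
      simp
    · simp [fwdB, if_neg h]

-- a fold of key-determined inserts looks up as the function on members
theorem getD_foldl_insert_fun (g : Int × Int → Bool) (q : Int × Int) :
    ∀ (L : List (Int × Int)) (d : PySem.Dict (Int × Int) Bool),
    (L.foldl (fun cur p => cur.insert p (g p)) d).getD q false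
      = if q ∈ L then g q else d.getD q false := by
  intro L
  induction L with
  | nil => intro d; simp
  | cons p rest ih =>
    intro d
    simp only [List.foldl_cons, ih, PySem.Dict.getD_insert, List.mem_cons]
    by_cases hr : q ∈ rest
    · simp [hr]
    · by_cases hq : q = p <;> simp [hr, hq]

-- main invariant: the backward sweep over the forward levels values every frontier state
-- exactly as A's recursion does
theorem bwd_fwd_correct : ∀ (fuel : Nat) (m lv : Int) (F : List (Int × Int)),
    lv ≤ m → (m - lv).toNat ≤ fuel →
    ∀ p ∈ F, p.1 + p.2 < 62 →
    (bwdB (fwdB fuel [] F lv m) lv m).getD p false = fA_aux ((m - lv).toNat) p.1 p.2 lv m := by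
  intro fuel
  induction fuel with
  | zero =>
    intro m lv F hlm hfuel p hp hterm
    have hlv : lv = m := by omega
    have h0 : (m - lv).toNat = 0 := by omega
    rw [h0, fA_aux_stop 0 _ _ _ _ (by omega) hlv]
    simp [fwdB, bwdB]
  | succ n ih =>
    intro m lv F hlm hfuel p hp hterm
    by_cases hlt : lv < m
    · -- fuel for the children
      have hk : (m - lv).toNat = (m - (lv + 1)).toNat + 1 := by omega
      have hcond : F ≠ [] ∧ lv < m := ⟨by intro h; subst h; exact absurd hp (List.not_mem_nil), hlt⟩
      set F' := PySem.Set.ofList ((F.flatMap (fun p => kidsB p.1 p.2)).filter (fun q => q.1 + q.2 < 62)) with hF'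
      have hfwd : fwdB (n + 1) [] F lv m = F :: fwdB n [] F' (lv + 1) m := by
        simp only [fwdB, if_pos hcond]
        rw [fwdB_acc]
        simp only [List.nil_append, List.singleton_append]
        rw [hF']
      rw [hfwd]
      simp only [bwdB]
      rw [getD_foldl_insert_fun (fun p => lvlvalB (bwdB (fwdB n [] F' (lv + 1) m) (lv + 1) m) lv m p.1 p.2) p F, if_pos hp]
      -- each child's entry in the table is its A-value
      have hkid : ∀ q ∈ kidsB p.1 p.2,
          (if 62 ≤ q.1 + q.2 then decide (PySem.Int.mod (lv + 1) 2 = PySem.Int.mod m 2)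
           else if lv + 1 = m then false
           else (bwdB (fwdB n [] F' (lv + 1) m) (lv + 1) m).getD q false)
          = fA_aux ((m - (lv + 1)).toNat) q.1 q.2 (lv + 1) m := by
        intro q hq
        by_cases hw : 62 ≤ q.1 + q.2
        · rw [fA_aux_win _ _ _ _ _ hw, if_pos hw]
        · rw [if_neg hw]
          by_cases hm : lv + 1 = m
          · rw [if_pos hm, fA_aux_stop _ _ _ _ _ hw hm]
          · rw [if_neg hm]
            apply ih m (lv + 1) F' (by omega) (by omega) q _ (by omega)
            rw [hF']
            rw [PySem.Set.mem_ofList]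
            simp only [List.mem_filter, List.mem_flatMap]
            exact ⟨⟨p, hp, hq⟩, by simpa using hw⟩
      have h1 := hkid (p.1 + 3, p.2) (by simp [kidsB])
      have h2 := hkid (p.1, p.2 + 3) (by simp [kidsB])
      have h3 := hkid (p.1 * 2, p.2) (by simp [kidsB])
      have h4 := hkid (p.1, p.2 * 2) (by simp [kidsB])
      rw [hk]
      have hne : ¬ lv = m := by omega
      have hnw : ¬ 62 ≤ p.1 + p.2 := by omega
      simp only [fA_aux, if_neg hnw, if_neg hne, lvlvalB, kidsB, List.map_cons, List.map_nil]
      rw [h1, h2, h3, h4]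
    · -- lv = m: no level is stored; A stops with False
      have hlv : lv = m := by omega
      have h0 : (m - lv).toNat = 0 := by omega
      have hcond : ¬ (F ≠ [] ∧ lv < m) := by intro h; omega
      rw [h0, fA_aux_stop 0 _ _ _ _ (by omega) hlv]
      simp [fwdB, if_neg hcond, bwdB]

-- ===== VERDICT (by name: the statement is the Claim_ definition above) =====
theorem f_spec : Claim_equal_f := by
  intro a b c m _ hpre
  unfold Spec_f f f_alt
  by_cases hw : 62 ≤ a + b
  · rw [fA_aux_win _ _ _ _ _ hw, if_pos hw]
  · rw [if_neg hw]
    by_cases hc : c = m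
    · rw [if_pos hc, fA_aux_stop _ _ _ _ _ hw hc]
    · rw [if_neg hc]
      have hcm : c ≤ m := (hpre.resolve_left hw).1
      exact (bwd_fwd_correct ((m - c).toNat) m c [(a, b)] hcm le_rfl (a, b) (by simp) (by omega)).symm
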